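-- pv_equiv track=rewrite | github.com/NhaNhaa/Codify.works-Evaluation | backend/agents/agent1_validators.py | instructions_explicitly_allow_output_skills
-- ===== SOURCE A (Python) =====
-- OUTPUT_SKILL_KEYWORDS = [
--     "printf",
--     "print",
--     "display",
--     "output",
--     "separator",
--     "comma",
--     "format",
--     "trailing comma",
--     "between elements",
-- ]
--
-- OUTPUT_OBJECTIVE_HEADER_KEYWORDS = [
--     "micro skills",
--     "micro skills to evaluate",
--     "skills to evaluate",
--     "learning objectives",
--     "objectives",
--     "evaluation criteria",
--     "grading criteria",
-- ]
--
-- EXPLICIT_OBJECTIVE_SIGNAL_KEYWORDS = [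
--     "learning objective",
--     "learning objectives",
--     "skill",
--     "skills",
--     "evaluate",
--     "evaluation",
--     "objective",
--     "criteria",
-- ]
--
-- def instructions_explicitly_allow_output_skills(instructions: str) -> bool:
--     """
--     Returns True only when instructions.md explicitly frames output/printing
--     as a learning objective or micro skill.
--
--     Conservative by design:
--     - 'INPUT-OUTPUT' example lines do NOT count.
--     - Generic assignment wording like 'print the result' does NOT count.
--     - A labeled objective/skill section containing output keywords DOES count.
--     """
--     if not isinstance(instructions, str) or not instructions.strip():
--         return False
--
--     lines = instructions.splitlines()
--
--     section_start_index = None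
--     for index, line in enumerate(lines):
--         normalized_heading = line.strip().lstrip("#").strip().lower()
--
--         if any(
--             normalized_heading == keyword or normalized_heading.startswith(keyword)
--             for keyword in OUTPUT_OBJECTIVE_HEADER_KEYWORDS
--         ):
--             section_start_index = index
--             break
--
--     if section_start_index is not None:
--         for line in lines[section_start_index + 1:]:
--             stripped = line.strip()
--             if not stripped:
--                 continue
--             if stripped.startswith("#"):
--                 break
--
--             lowered = stripped.lower()
--             if _contains_output_keyword(lowered):
--                 return True
--
--     for line in lines:
--         lowered = line.strip().lower()
--         if not lowered:
--             continue
--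
--         has_objective_signal = any(
--             signal in lowered for signal in EXPLICIT_OBJECTIVE_SIGNAL_KEYWORDS
--         )
--         if has_objective_signal and _contains_output_keyword(lowered):
--             return True
--
--     return False
--
-- def _contains_output_keyword(text: str) -> bool:
--     """
--     Returns True if text contains any output/display keyword.
--     """
--     return any(keyword in text for keyword in OUTPUT_SKILL_KEYWORDS)
-- ===== SOURCE B (Python) =====
-- OUTPUT_SKILL_KEYWORDS = [
--     "printf",
--     "print",
--     "display",
--     "output",
--     "separator",
--     "comma",
--     "format",
--     "trailing comma",
--     "between elements",
-- ]
--
-- OUTPUT_OBJECTIVE_HEADER_KEYWORDS = [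
--     "micro skills",
--     "micro skills to evaluate",
--     "skills to evaluate",
--     "learning objectives",
--     "objectives",
--     "evaluation criteria",
--     "grading criteria",
-- ]
--
-- EXPLICIT_OBJECTIVE_SIGNAL_KEYWORDS = [
--     "learning objective",
--     "learning objectives",
--     "skill",
--     "skills",
--     "evaluate",
--     "evaluation",
--     "objective",
--     "criteria",
-- ]
--
--
-- def _has_output_kw(text):
--     return any(k in text for k in OUTPUT_SKILL_KEYWORDS)
--
--
-- def instructions_explicitly_allow_output_skills(instructions: str) -> bool:
--     # Single linear pass maintaining a section-state flag; returns True as soon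
--     # as either signal fires (OR of the two predicates is order-independent on bool).
--     if not isinstance(instructions, str) or not instructions.strip():
--         return False
--
--     seen_header = False   # the first matching header has been passed
--     in_section = False    # currently inside that (first) labeled section
--     for line in instructions.splitlines():
--         stripped = line.strip()
--         lowered = stripped.lower()
--
--         # objective-signal + output keyword on the same (non-blank) line
--         if stripped and any(s in lowered for s in EXPLICIT_OBJECTIVE_SIGNAL_KEYWORDS) \
--                 and _has_output_kw(lowered):
--             return True
--
--         if not seen_header:
--             normalized = stripped.lstrip("#").strip().lower()
--             if any(normalized == k or normalized.startswith(k)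
--                    for k in OUTPUT_OBJECTIVE_HEADER_KEYWORDS):
--                 seen_header = True
--                 in_section = True
--         elif in_section:
--             if not stripped:
--                 continue
--             if stripped.startswith("#"):
--                 in_section = False
--             elif _has_output_kw(lowered):
--                 return True
--
--     return False
-- ===== Notes on version B (the rewrite author's own statement) =====
-- stated objective: alternative
-- what changed: Replaces A's three separate passes over the lines (header search with enumerate, a second scan of the section slice, a third scan of all lines) by one linear pass that maintains a seen_header/in_section state flag and returns as soon as either predicate fires.
import Mathlib
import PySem

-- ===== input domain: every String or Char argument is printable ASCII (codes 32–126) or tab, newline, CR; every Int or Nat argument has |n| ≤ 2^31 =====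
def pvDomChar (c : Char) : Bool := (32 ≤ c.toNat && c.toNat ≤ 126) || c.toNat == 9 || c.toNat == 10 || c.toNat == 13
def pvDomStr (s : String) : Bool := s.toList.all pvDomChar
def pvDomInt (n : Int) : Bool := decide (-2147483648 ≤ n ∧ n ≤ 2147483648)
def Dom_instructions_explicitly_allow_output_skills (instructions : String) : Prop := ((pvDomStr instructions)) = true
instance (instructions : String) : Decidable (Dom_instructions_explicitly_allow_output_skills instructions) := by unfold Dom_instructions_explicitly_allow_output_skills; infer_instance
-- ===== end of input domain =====

-- B replaces A's three separate passes (header search, section scan, whole-text signal scan)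
-- by one linear pass over the lines maintaining a section-state flag (objective: alternative).

-- module-level keyword constants (shared data of both Python files)
def OUTPUT_SKILL_KEYWORDS : List String :=
  ["printf", "print", "display", "output", "separator", "comma", "format",
   "trailing comma", "between elements"]

def OUTPUT_OBJECTIVE_HEADER_KEYWORDS : List String :=
  ["micro skills", "micro skills to evaluate", "skills to evaluate",
   "learning objectives", "objectives", "evaluation criteria", "grading criteria"]

def EXPLICIT_OBJECTIVE_SIGNAL_KEYWORDS : List String :=
  ["learning objective", "learning objectives", "skill", "skills",
   "evaluate", "evaluation", "objective", "criteria"]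

-- ===== PORT A =====

-- _contains_output_keyword(text)
def containsOutputKeyword (text : String) : Bool :=
  OUTPUT_SKILL_KEYWORDS.any (fun k => PySem.Str.isIn k text)

-- s.lstrip("#") hand-ported: drops exactly the leading '#' characters (exact)
def lstripHash (s : String) : String := String.ofList (s.toList.dropWhile (· == '#'))

-- line.strip().lstrip("#").strip().lower()
def normalizedHeading (line : String) : String :=
  PySem.Str.lower (PySem.Str.strip (lstripHash (PySem.Str.strip line)))

-- the any(normalized == kw or normalized.startswith(kw) ...) test of A's first loop
def isHeaderLine (line : String) : Bool :=
  OUTPUT_OBJECTIVE_HEADER_KEYWORDS.any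
    (fun k => normalizedHeading line == k || PySem.Str.startswith (normalizedHeading line) k)

-- A's first loop: enumerate(lines), break at first header → section_start_index
def aFindHeader : List String → Option Nat
  | [] => none
  | l :: ls => if isHeaderLine l then some 0 else (aFindHeader ls).map (· + 1)

-- A's second loop over lines[section_start_index+1:]
def aSectionScan : List String → Bool
  | [] => false
  | l :: ls =>
    let stripped := PySem.Str.strip l
    if stripped == "" then aSectionScan ls
    else if PySem.Str.startswith stripped "#" then false
    else if containsOutputKeyword (PySem.Str.lower stripped) then true
    else aSectionScan ls

-- A's third loop over all lines
def aSignalScan : List String → Bool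
  | [] => false
  | l :: ls =>
    let lowered := PySem.Str.lower (PySem.Str.strip l)
    if lowered == "" then aSignalScan ls
    else if (EXPLICIT_OBJECTIVE_SIGNAL_KEYWORDS.any (fun s => PySem.Str.isIn s lowered))
              && containsOutputKeyword lowered then true
    else aSignalScan ls

def instructions_explicitly_allow_output_skills (instructions : String) : Bool :=
  if PySem.Str.strip instructions == "" then false
  else
    let lines := PySem.Str.splitlines instructions
    match aFindHeader lines with
    | some i =>
        -- lines[i+1:] with i+1 ≥ 0 is List.drop (i+1)
        if aSectionScan (List.drop (i + 1) lines) then true else aSignalScan lines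
    | none => aSignalScan lines

-- ===== PORT B =====

def bHasOutputKw (text : String) : Bool :=
  OUTPUT_SKILL_KEYWORDS.any (fun k => PySem.Str.isIn k text)

-- the single pass of Source B: state = (seen_header, in_section)
def bLoop : List String → Bool → Bool → Bool
  | [], _, _ => false
  | l :: ls, seenHeader, inSection =>
    let stripped := PySem.Str.strip l
    let lowered := PySem.Str.lower stripped
    if stripped != ""
        && (EXPLICIT_OBJECTIVE_SIGNAL_KEYWORDS.any (fun s => PySem.Str.isIn s lowered))
        && bHasOutputKw lowered then
      true
    else if !seenHeader then
      let normalized := PySem.Str.lower (PySem.Str.strip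
        (String.ofList (stripped.toList.dropWhile (· == '#'))))
      if OUTPUT_OBJECTIVE_HEADER_KEYWORDS.any
          (fun k => normalized == k || PySem.Str.startswith normalized k) then
        bLoop ls true true
      else
        bLoop ls seenHeader inSection
    else if inSection then
      if stripped == "" then bLoop ls seenHeader inSection
      else if PySem.Str.startswith stripped "#" then bLoop ls seenHeader false
      else if bHasOutputKw lowered then true
      else bLoop ls seenHeader inSection
    else bLoop ls seenHeader inSection

def instructions_explicitly_allow_output_skills_alt (instructions : String) : Bool :=
  if PySem.Str.strip instructions == "" then false
  else bLoop (PySem.Str.splitlines instructions) false false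

-- ===== PRECONDITION & SPEC =====
def Spec_instructions_explicitly_allow_output_skills (instructions : String) (out : Bool) : Prop := out = instructions_explicitly_allow_output_skills_alt instructions
instance (instructions : String) (out : Bool) : Decidable (Spec_instructions_explicitly_allow_output_skills instructions out) := by unfold Spec_instructions_explicitly_allow_output_skills; infer_instance

-- ===== CLAIM (what is proved, stated in full; the proofs are below) =====
def Claim_equal_instructions_explicitly_allow_output_skills : Prop := ∀ (instructions : String), Dom_instructions_explicitly_allow_output_skills instructions → Spec_instructions_explicitly_allow_output_skills instructions (instructions_explicitly_allow_output_skills instructions)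

-- ===== LEMMAS AND PROOFS =====

-- the per-line "objective signal + output keyword" predicate (B's first test)
def pObj (l : String) : Bool :=
  PySem.Str.strip l != ""
    && (EXPLICIT_OBJECTIVE_SIGNAL_KEYWORDS.any
          (fun s => PySem.Str.isIn s (PySem.Str.lower (PySem.Str.strip l))))
    && bHasOutputKw (PySem.Str.lower (PySem.Str.strip l))

theorem lower_beq_empty (s : String) : (PySem.Str.lower s == "") = (s == "") := by
  have hl : (PySem.Str.lower s).toList = s.toList.map PySem.Chars.lowerChar := by
    simp [PySem.Str.toList_lower, PySem.Chars.lower]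
  cases h : s == ""
  · simp only [beq_eq_false_iff_ne] at h
    have : (PySem.Str.lower s) ≠ "" := by
      intro he
      apply h
      have := congrArg String.toList he
      rw [hl] at this
      simp at this
      exact String.toList_injective (by simp [this])
    simp [this]
  · simp only [beq_iff_eq] at h
    subst h
    rfl

theorem hasOut_eq : bHasOutputKw = containsOutputKeyword := rfl

theorem aSignalScan_eq_any (ls : List String) : aSignalScan ls = ls.any pObj := by
  induction ls with
  | nil => rfl
  | cons l ls ih =>
    cases h : (PySem.Str.strip l == "") <;>
    cases hs : (EXPLICIT_OBJECTIVE_SIGNAL_KEYWORDS.any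
        (fun s => PySem.Str.isIn s (PySem.Str.lower (PySem.Str.strip l)))) <;>
    cases ho : containsOutputKeyword (PySem.Str.lower (PySem.Str.strip l)) <;>
    simp only [aSignalScan, List.any_cons, pObj, lower_beq_empty, hasOut_eq, bne,
      h, hs, ho, Bool.not_false, Bool.not_true, Bool.false_and, Bool.and_false,
      Bool.true_and, Bool.and_true, Bool.false_or, Bool.true_or, Bool.or_false,
      if_true, if_false, Bool.false_eq_true, Bool.true_eq_false, ite_false, ite_true, ih] <;>
    simp [ih]

theorem bLoop_done (ls : List String) : bLoop ls true false = ls.any pObj := by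
  induction ls with
  | nil => rfl
  | cons l ls ih =>
    simp only [bLoop, List.any_cons, pObj]
    cases hp : (PySem.Str.strip l != ""
        && (EXPLICIT_OBJECTIVE_SIGNAL_KEYWORDS.any
              (fun s => PySem.Str.isIn s (PySem.Str.lower (PySem.Str.strip l))))
        && bHasOutputKw (PySem.Str.lower (PySem.Str.strip l)))
    · simp [hp, ih]
    · simp [hp]

theorem bLoop_insec (ls : List String) :
    bLoop ls true true = (aSectionScan ls || ls.any pObj) := by
  induction ls with
  | nil => rfl
  | cons l ls ih =>
    cases h : (PySem.Str.strip l == "") <;>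
    cases hs : (EXPLICIT_OBJECTIVE_SIGNAL_KEYWORDS.any
        (fun s => PySem.Str.isIn s (PySem.Str.lower (PySem.Str.strip l)))) <;>
    cases ho : containsOutputKeyword (PySem.Str.lower (PySem.Str.strip l)) <;>
    cases hh : PySem.Str.startswith (PySem.Str.strip l) "#" <;>
    simp only [bLoop, aSectionScan, List.any_cons, pObj, hasOut_eq, bne,
      h, hs, ho, hh, Bool.not_false, Bool.not_true, Bool.false_and, Bool.and_false,
      Bool.true_and, Bool.and_true, Bool.false_or, Bool.true_or, Bool.or_false,
      if_true, if_false, ih, bLoop_done] <;>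
    simp [ih, bLoop_done]

theorem bLoop_main (ls : List String) :
    bLoop ls false false =
      (match aFindHeader ls with
       | some i => aSectionScan (List.drop (i + 1) ls) || ls.any pObj
       | none => ls.any pObj) := by
  induction ls with
  | nil => rfl
  | cons l ls ih =>
    cases h : (PySem.Str.strip l == "") <;>
    cases hs : (EXPLICIT_OBJECTIVE_SIGNAL_KEYWORDS.any
        (fun s => PySem.Str.isIn s (PySem.Str.lower (PySem.Str.strip l)))) <;>
    cases ho : containsOutputKeyword (PySem.Str.lower (PySem.Str.strip l)) <;>
    cases hd : (OUTPUT_OBJECTIVE_HEADER_KEYWORDS.any (fun k =>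
        PySem.Str.lower (PySem.Str.strip
          (String.ofList ((PySem.Str.strip l).toList.dropWhile (· == '#')))) == k
        || PySem.Str.startswith
            (PySem.Str.lower (PySem.Str.strip
              (String.ofList ((PySem.Str.strip l).toList.dropWhile (· == '#'))))) k)) <;>
    cases haf : aFindHeader ls <;>
    simp only [haf] at ih <;>
    simp only [bLoop, aFindHeader, aSectionScan, List.any_cons, pObj, hasOut_eq, bne,
      isHeaderLine, normalizedHeading, lstripHash,
      h, hs, ho, hd, Bool.not_false, Bool.not_true, Bool.false_and, Bool.and_false,
      Bool.true_and, Bool.and_true, Bool.false_or, Bool.true_or, Bool.or_false,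
      if_true, if_false, Option.map_none, Option.map_some,
      List.drop_succ_cons, haf, ih, bLoop_insec] <;>
    simp [haf, ih, bLoop_insec, List.drop_succ_cons]

-- ===== VERDICT (by name: the statement is the Claim_ definition above) =====
theorem instructions_explicitly_allow_output_skills_spec : Claim_equal_instructions_explicitly_allow_output_skills := by
  intro instructions _
  unfold Spec_instructions_explicitly_allow_output_skills
  unfold instructions_explicitly_allow_output_skills instructions_explicitly_allow_output_skills_alt
  cases h : (PySem.Str.strip instructions == "")
  · simp only [h, if_neg, Bool.false_eq_true, if_false]
    rw [bLoop_main]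
    cases hf : aFindHeader (PySem.Str.splitlines instructions) with
    | none => simp [aSignalScan_eq_any]
    | some i =>
        simp only []
        rw [aSignalScan_eq_any]
        cases hs : aSectionScan (List.drop (i + 1) (PySem.Str.splitlines instructions)) <;> simp [hs]
  · simp [h]
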